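-- pv_equiv track=rewrite | github.com/brcarry/python | problem2.py | list_append
-- ===== SOURCE A (Python) =====
-- def list_len(lst):
--     length = 0
--     for item in lst:
--         length += 1
--     return length
--
-- def list_append(lst, num):
--     lst_append = [0] * (list_len(lst) + 1)
--     i = 0
--     for item in lst:
--         lst_append[i] = item
--         i += 1
--     lst_append[i] = num
--     return lst_append
-- ===== SOURCE B (Python) =====
-- def list_append(lst, num):
--     return list(lst) + [num]
-- ===== Notes on version B (the rewrite author's own statement) =====
-- stated objective: idiomatic
-- what changed: Replaces A's count-then-preallocate-then-index-fill loops with a single closed-form concatenation list(lst) + [num].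
import Mathlib
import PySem

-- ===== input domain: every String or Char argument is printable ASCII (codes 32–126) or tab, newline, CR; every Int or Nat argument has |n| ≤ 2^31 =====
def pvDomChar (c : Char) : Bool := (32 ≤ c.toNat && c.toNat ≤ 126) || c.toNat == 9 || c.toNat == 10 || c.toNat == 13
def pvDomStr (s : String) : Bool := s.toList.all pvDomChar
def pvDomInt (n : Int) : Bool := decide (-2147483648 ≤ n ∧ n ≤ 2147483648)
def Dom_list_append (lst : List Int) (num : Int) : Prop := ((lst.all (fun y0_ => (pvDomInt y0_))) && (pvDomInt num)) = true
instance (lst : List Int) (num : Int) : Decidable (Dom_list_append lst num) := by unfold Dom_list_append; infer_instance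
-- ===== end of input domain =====

-- B replaces A's count-allocate-index-fill loops with the direct concatenation list(lst) + [num] (idiomatic, same cost class).

-- ===== PORT A =====
-- helper: A's list_len (counts elements one by one)
def list_len (lst : List Int) : Nat :=
  lst.foldl (fun length _ => length + 1) 0

-- A: preallocate [0] * (len+1), fill by index with a running counter i, then place num at i.
def list_append (lst : List Int) (num : Int) : List Int :=
  let s := lst.foldl (fun (s : List Int × Nat) item => (s.1.set s.2 item, s.2 + 1))
    (List.replicate (list_len lst + 1) 0, 0)
  s.1.set s.2 num

-- ===== PORT B =====
def list_append_alt (lst : List Int) (num : Int) : List Int :=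
  lst ++ [num]

-- ===== PRECONDITION & SPEC =====
def Spec_list_append (lst : List Int) (num : Int) (out : List Int) : Prop := out = list_append_alt lst num
instance (lst : List Int) (num : Int) (out : List Int) : Decidable (Spec_list_append lst num out) := by unfold Spec_list_append; infer_instance

-- ===== CLAIM (what is proved, stated in full; the proofs are below) =====
def Claim_equal_list_append : Prop := ∀ (lst : List Int) (num : Int), Dom_list_append lst num → Spec_list_append lst num (list_append lst num)

-- ===== LEMMAS AND PROOFS =====

-- setting the element right after a prefix
theorem set_at_prefix_len (pre : List Int) (x a : Int) (t : List Int) :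
    (pre ++ x :: t).set pre.length a = pre ++ a :: t := by
  induction pre with
  | nil => simp
  | cons h tl ih => simp [ih]

-- A's fill loop invariant: filling into pre ++ zeros writes lst after pre
theorem fill_loop (lst : List Int) : ∀ (pre : List Int),
    lst.foldl (fun (s : List Int × Nat) item => (s.1.set s.2 item, s.2 + 1))
      (pre ++ List.replicate (lst.length + 1) 0, pre.length)
    = (pre ++ lst ++ [0], pre.length + lst.length) := by
  induction lst with
  | nil => intro pre; simp
  | cons a l ih =>
    intro pre
    simp only [List.foldl_cons, List.length_cons]
    have h1 : (pre ++ List.replicate (l.length + 1 + 1) 0).set pre.length a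
        = (pre ++ [a]) ++ List.replicate (l.length + 1) 0 := by
      rw [List.replicate_succ, set_at_prefix_len]; simp
    have h2 : pre.length + 1 = (pre ++ [a]).length := by simp
    rw [h1, h2, ih (pre ++ [a])]
    simp; omega

theorem list_len_eq (lst : List Int) : list_len lst = lst.length := by
  unfold list_len
  induction lst with
  | nil => rfl
  | cons a l ih =>
    simp only [List.foldl_cons, List.length_cons]
    rw [show (0 : Nat) + 1 = 1 from rfl]
    have : ∀ (l : List Int) (n : Nat),
        l.foldl (fun length _ => length + 1) n = n + l.length := by
      intro l; induction l with
      | nil => simp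
      | cons b t ih2 => intro n; simp [ih2]; omega
    rw [this]; omega

-- ===== VERDICT (by name: the statement is the Claim_ definition above) =====
theorem list_append_spec : Claim_equal_list_append := by
  intro lst num _
  show list_append lst num = list_append_alt lst num
  unfold list_append list_append_alt
  have := fill_loop lst []
  simp only [List.nil_append, List.length_nil, Nat.zero_add, list_len_eq] at *
  rw [this]
  simp [set_at_prefix_len lst 0 num []]
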